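-- pv_equiv track=rewrite | github.com/bendicsekb/binning | discretization.py | generate_all_splits
-- ===== SOURCE A (Python) =====
-- def generate_all_splits(n):
--     ranges = []
--     for i in range(1,n):
--         arr = [True] * i
--         arr.extend([False] * (n-i))
--         ranges.append(arr)
--     neg_ranges = [[not elem for elem in r] for r in ranges]
--     splits = []
--     splits.extend(ranges)
--     splits.extend(neg_ranges)
--     for j in range(1, len(ranges)):
--         for i, a in enumerate(ranges[j:]):
--             b = neg_ranges[i]
--             splits.append([ai and bi for ai, bi in zip(a, b)])
--     return splits
-- ===== SOURCE B (Python) =====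
-- def generate_all_splits(n):
--     splits = []
--     for i in range(1, n):
--         splits.append([True] * i + [False] * (n - i))
--     for i in range(1, n):
--         splits.append([False] * i + [True] * (n - i))
--     for L in range(1, n - 1):
--         for s in range(1, n - L):
--             splits.append([False] * s + [True] * L + [False] * (n - s - L))
--     return splits
-- ===== Notes on version B (the rewrite author's own statement) =====
-- stated objective: simpler
-- what changed: B builds every mask directly from its start index and run length ([False]*s+[True]*L+[False]*rest) in three plain loops, instead of A's strategy of precomputing prefix masks and their negations and intersecting slices of the two lists with zip to obtain the middle masks.
import Mathlib
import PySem

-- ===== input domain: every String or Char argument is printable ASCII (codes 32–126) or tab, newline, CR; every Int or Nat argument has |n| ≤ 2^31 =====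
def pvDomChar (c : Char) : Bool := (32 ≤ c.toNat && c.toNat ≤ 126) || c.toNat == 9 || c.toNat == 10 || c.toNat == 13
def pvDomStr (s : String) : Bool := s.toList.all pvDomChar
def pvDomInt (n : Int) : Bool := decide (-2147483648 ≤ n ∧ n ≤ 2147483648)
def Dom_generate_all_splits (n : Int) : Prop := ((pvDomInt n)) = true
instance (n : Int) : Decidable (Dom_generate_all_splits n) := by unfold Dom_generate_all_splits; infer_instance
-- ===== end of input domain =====

-- B replaces A's prefix/negation/zip-intersection construction by directly writing each mask
-- from its start index and run length; same masks in the same order (objective: simpler).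

-- ===== PORT A =====
def generate_all_splits (n : Int) : List (List Bool) :=
  let ranges := (PySem.List.pyRange 1 n 1).foldl
    (fun acc i => acc ++ [List.replicate i.toNat true ++ List.replicate (n - i).toNat false]) []
  let neg_ranges := ranges.map (fun r => r.map (fun e => !e))
  let splits : List (List Bool) := [] ++ ranges ++ neg_ranges
  (PySem.List.pyRange 1 (ranges.length : Int) 1).foldl
    (fun acc j =>
      (PySem.List.enumerate (PySem.List.slice ranges (some j) none) 0).foldl
        (fun acc2 p =>
          let b := PySem.List.pyGetD neg_ranges p.1 []
          acc2 ++ [(p.2.zip b).map (fun q => q.1 && q.2)]) acc) splits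

-- ===== PORT B =====
def generate_all_splits_alt (n : Int) : List (List Bool) :=
  let splits := (PySem.List.pyRange 1 n 1).foldl
    (fun acc i => acc ++ [List.replicate i.toNat true ++ List.replicate (n - i).toNat false]) []
  let splits := (PySem.List.pyRange 1 n 1).foldl
    (fun acc i => acc ++ [List.replicate i.toNat false ++ List.replicate (n - i).toNat true]) splits
  (PySem.List.pyRange 1 (n - 1) 1).foldl
    (fun acc L =>
      (PySem.List.pyRange 1 (n - L) 1).foldl
        (fun acc2 s =>
          acc2 ++ [List.replicate s.toNat false ++ List.replicate L.toNat true ++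
                   List.replicate (n - s - L).toNat false]) acc) splits

-- ===== PRECONDITION & SPEC =====
def Spec_generate_all_splits (n : Int) (out : List (List Bool)) : Prop := out = generate_all_splits_alt n
instance (n : Int) (out : List (List Bool)) : Decidable (Spec_generate_all_splits n out) := by unfold Spec_generate_all_splits; infer_instance

-- ===== CLAIM (what is proved, stated in full; the proofs are below) =====
def Claim_equal_generate_all_splits : Prop := ∀ (n : Int), Dom_generate_all_splits n → Spec_generate_all_splits n (generate_all_splits n)

-- ===== LEMMAS AND PROOFS =====

theorem crux (N p q : Nat) (hq : q < p) (hp : p < N) :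
  ((List.replicate p true ++ List.replicate (N - p) false).zip
   ((List.replicate q true ++ List.replicate (N - q) false).map (fun e => !e))).map (fun r => r.1 && r.2)
  = List.replicate q false ++ (List.replicate (p - q) true ++ List.replicate (N - p) false) := by
  have h1 : List.replicate p true = List.replicate q true ++ List.replicate (p-q) true := by
    rw [← List.replicate_add]; congr 1; omega
  have h2 : List.replicate (N-q) (true:Bool) = List.replicate (p-q) true ++ List.replicate (N-p) true := by
    rw [← List.replicate_add]; congr 1; omega
  simp only [List.map_append, List.map_replicate, Bool.not_true, Bool.not_false]
  rw [h1, h2, List.append_assoc, List.zip_append (by simp), List.zip_append (by simp)]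
  simp

theorem outer_range (n : Int) : PySem.List.pyRange 1 ((n-1).toNat : Int) 1 = PySem.List.pyRange 1 (n-1) 1 := by
  by_cases h : 1 ≤ n
  · congr 1; omega
  · rw [PySem.List.pyRange_one_eq_nil (by omega), PySem.List.pyRange_one_eq_nil (by omega)]

theorem pyRange_drop (a b : Int) (t : Nat) (h : a + t ≤ b) :
    (PySem.List.pyRange a b 1).drop t = PySem.List.pyRange (a + t) b 1 := by
  rw [PySem.List.pyRange_one_append a (a + t) b (by omega) h]
  rw [List.drop_left' (by rw [PySem.List.length_pyRange_one]; omega)]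

theorem gas_main (n : Int) : generate_all_splits n = generate_all_splits_alt n := by
  unfold generate_all_splits generate_all_splits_alt
  simp only [PySem.List.foldl_append_singleton_eq_map, PySem.List.foldl_append_eq_flatMap,
    List.nil_append]
  congr 1
  · -- negations are the suffix masks
    congr 1
    rw [List.map_map]
    apply List.map_congr_left
    intro i _
    simp
  · -- the middle masks
    rw [List.length_map, PySem.List.length_pyRange_one]
    rw [show ((n-1).toNat : Int) = ((n-1).toNat : Int) from rfl]
    rw [outer_range n]
    apply List.flatMap_congr
    intro j hj
    rw [PySem.List.mem_pyRange_one] at hj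
    rw [PySem.List.slice_from _ (show (0:Int) ≤ j by omega), ← List.map_drop, pyRange_drop 1 n j.toNat (by omega)]
    apply List.ext_getElem
    · simp [PySem.List.length_enumerate, PySem.List.length_pyRange_one]
      omega
    · intro k h1 h2
      simp only [PySem.List.length_enumerate, List.length_map, PySem.List.length_pyRange_one] at h1 h2
      simp only [List.getElem_map, PySem.List.getElem_enumerate, PySem.List.getElem_pyRange_one]
      simp only [zero_add, PySem.List.pyGetD_natCast]
      rw [List.getD_eq_getElem _ _ (by simp [PySem.List.length_pyRange_one]; omega)]
      simp only [List.getElem_map, PySem.List.getElem_pyRange_one]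
      rw [List.append_assoc]
      have C := crux n.toNat (1 + j.toNat + k) (1 + k) (by omega) (by omega)
      rw [show 1 + j.toNat + k - (1 + k) = j.toNat from by omega] at C
      rw [show (1 + (j.toNat:Int) + (k:Int)).toNat = 1 + j.toNat + k from by omega,
          show (n - (1 + (j.toNat:Int) + (k:Int))).toNat = n.toNat - (1 + j.toNat + k) from by omega,
          show ((1:Int) + (k:Int)).toNat = 1 + k from by omega,
          show (n - (1 + (k:Int))).toNat = n.toNat - (1 + k) from by omega,
          show (n - (1 + (k:Int)) - j).toNat = n.toNat - (1 + j.toNat + k) from by omega]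
      exact C

-- ===== VERDICT (by name: the statement is the Claim_ definition above) =====
theorem generate_all_splits_spec : Claim_equal_generate_all_splits := by
  intro n _
  unfold Spec_generate_all_splits
  exact gas_main n
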